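-- pv_equiv track=rewrite | github.com/gongshuang33/PythonScripts | ONT数据合并及其质控/DataMerge/scripts/ont_qc_info.py | n50_gt
-- ===== SOURCE A (Python) =====
-- def n50_gt(_length_list):
-- 	_n50_gt = dict()
-- 	a = [5, 10, 12, 15, 20]
-- 	for a_i in range(len(a)):
-- 		lt_base_num = gt_base_num = 0
-- 		for i in _length_list:
-- 			if (i >= a[a_i] * 10000):
-- 				gt_base_num += i
-- 			else:
-- 				lt_base_num += i
-- 				if (lt_base_num >= gt_base_num):
-- 					break
-- 		_n50_gt["n50>%d0kb" % a[a_i]] = int(lt_base_num + gt_base_num)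
-- 	return _n50_gt
-- ===== SOURCE B (Python) =====
-- def n50_gt(_length_list):
--     a = [5, 10, 12, 15, 20]
--     states = [(0, 0, True) for _ in a]
--     for i in _length_list:
--         for k in range(len(a)):
--             lt, gt, active = states[k]
--             if active:
--                 if i >= a[k] * 10000:
--                     states[k] = (lt, gt + i, True)
--                 else:
--                     lt += i
--                     states[k] = (lt, gt, lt < gt)
--     return {"n50>%d0kb" % t: int(lt + gt) for t, (lt, gt, _) in zip(a, states)}
-- ===== Notes on version B (the rewrite author's own statement) =====
-- stated objective: alternative
-- what changed: A makes five separate scans of the list (one per threshold, each with its own early break); B makes a single pass over the list maintaining per-threshold (lt, gt, active) states, freezing a threshold's state exactly where A's break would fire.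
import Mathlib
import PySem

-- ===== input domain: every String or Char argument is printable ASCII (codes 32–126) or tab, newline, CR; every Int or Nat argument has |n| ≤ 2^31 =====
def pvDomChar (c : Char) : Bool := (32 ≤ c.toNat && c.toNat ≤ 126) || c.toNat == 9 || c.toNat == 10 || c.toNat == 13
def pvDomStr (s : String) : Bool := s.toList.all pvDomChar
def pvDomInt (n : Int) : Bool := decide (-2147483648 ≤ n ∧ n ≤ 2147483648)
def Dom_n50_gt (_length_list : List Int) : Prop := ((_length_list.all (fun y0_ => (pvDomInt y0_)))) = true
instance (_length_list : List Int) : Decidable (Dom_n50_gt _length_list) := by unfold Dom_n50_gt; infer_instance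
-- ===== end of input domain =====

-- B replaces A's five separate early-break scans by one pass with per-threshold frozen states (alternative decomposition, same cost).

-- ===== PORT A =====
-- inner 'for i in _length_list' loop with its early break, for one threshold thr = a[a_i]*10000
def n50Loop (thr : Int) (xs : List Int) (lt gt : Int) : Int × Int :=
  match xs with
  | [] => (lt, gt)
  | i :: rest =>
    if i ≥ thr then n50Loop thr rest lt (gt + i)
    else
      let lt' := lt + i
      if lt' ≥ gt then (lt', gt) else n50Loop thr rest lt' gt

def n50_gt (_length_list : List Int) : List (String × Int) :=
  let a : List Int := [5, 10, 12, 15, 20]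
  ((PySem.List.pyRange 0 (a.length : Int) 1).foldl
    (fun d a_i =>
      let av := PySem.List.pyGetD a a_i 0        -- a[a_i]; index always in range
      let r := n50Loop (av * 10000) _length_list 0 0
      PySem.Dict.insert d ("n50>" ++ PySem.Int.toStr av ++ "0kb") (r.1 + r.2))
    PySem.Dict.empty).items

-- ===== PORT B =====
-- one step of B's inner 'for k in range(len(a))' update for a single state
def n50Step (i : Int) (t : Int) (s : Int × Int × Bool) : Int × Int × Bool :=
  match s with
  | (lt, gt, active) =>
    if active then
      if i ≥ t * 10000 then (lt, gt + i, true)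
      else (lt + i, gt, decide (lt + i < gt))
    else s

def n50_gt_alt (_length_list : List Int) : List (String × Int) :=
  let a : List Int := [5, 10, 12, 15, 20]
  let states :=
    _length_list.foldl
      (fun st i => (a.zip st).map (fun p => n50Step i p.1 p.2))
      (a.map (fun _ => ((0 : Int), (0 : Int), true)))
  (a.zip states).map (fun p => ("n50>" ++ PySem.Int.toStr p.1 ++ "0kb", p.2.1 + p.2.2.1))

-- ===== PRECONDITION & SPEC =====
def Spec_n50_gt (_length_list : List Int) (out : List (String × Int)) : Prop := out = n50_gt_alt _length_list
instance (_length_list : List Int) (out : List (String × Int)) : Decidable (Spec_n50_gt _length_list out) := by unfold Spec_n50_gt; infer_instance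

-- ===== CLAIM (what is proved, stated in full; the proofs are below) =====
def Claim_equal_n50_gt : Prop := ∀ (_length_list : List Int), Dom_n50_gt _length_list → Spec_n50_gt _length_list (n50_gt _length_list)

-- ===== LEMMAS AND PROOFS =====

-- a frozen state is never touched again
theorem n50Step_frozen (t : Int) (xs : List Int) (lt gt : Int) :
    xs.foldl (fun s i => n50Step i t s) (lt, gt, false) = (lt, gt, false) := by
  induction xs with
  | nil => rfl
  | cons i rest ih => simpa [n50Step] using ih

-- B's per-threshold fold computes the same (lt, gt) pair as A's early-break scan
theorem n50Step_loop (t : Int) (xs : List Int) : ∀ (lt gt : Int),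
    xs.foldl (fun s i => n50Step i t s) (lt, gt, true)
      = ((n50Loop (t * 10000) xs lt gt).1, (n50Loop (t * 10000) xs lt gt).2,
         (xs.foldl (fun s i => n50Step i t s) (lt, gt, true)).2.2) := by
  induction xs with
  | nil => intro lt gt; rfl
  | cons i rest ih =>
    intro lt gt
    have hstep : (i :: rest).foldl (fun s i => n50Step i t s) (lt, gt, true)
        = rest.foldl (fun s i => n50Step i t s) (n50Step i t (lt, gt, true)) := rfl
    by_cases h : i ≥ t * 10000
    · have hs : n50Step i t (lt, gt, true) = (lt, gt + i, true) := by
        simp [n50Step, h]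
      rw [hstep, hs, n50Loop, if_pos h]
      exact ih lt (gt + i)
    · by_cases h2 : lt + i ≥ gt
      · have hs : n50Step i t (lt, gt, true) = (lt + i, gt, false) := by
          have : decide (lt + i < gt) = false := by simp; omega
          simp [n50Step, h, this]
        rw [hstep, hs, n50Step_frozen, n50Loop, if_neg h]
        simp [h2]
      · have hs : n50Step i t (lt, gt, true) = (lt + i, gt, true) := by
          have : decide (lt + i < gt) = true := by simp; omega
          simp [n50Step, h, this]
        rw [hstep, hs, n50Loop, if_neg h]
        simp only [if_neg h2]
        exact ih (lt + i) gt

theorem zip_map_zip {α β : Type} (ts : List Int) (f : Int → α → β) :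
    ∀ (ss : List α), ts.zip ((ts.zip ss).map (fun p => f p.1 p.2))
      = (ts.zip ss).map (fun p => (p.1, f p.1 p.2)) := by
  induction ts with
  | nil => intro ss; rfl
  | cons t ts ih =>
    intro ss
    cases ss with
    | nil => rfl
    | cons s ss => simp [ih ss]

theorem zip_map_snd {α : Type} (ts : List Int) :
    ∀ (ss : List α), ss.length = ts.length → (ts.zip ss).map (fun p => p.2) = ss := by
  induction ts with
  | nil => intro ss h; simpa using (List.length_eq_zero_iff.mp h)
  | cons t ts ih =>
    intro ss h
    cases ss with
    | nil => simp at h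
    | cons s ss => simp_all

-- pointwise decomposition of B's joint fold over the zipped state list
theorem foldl_zip_map (ts : List Int) (xs : List Int) :
    ∀ (ss : List (Int × Int × Bool)), ss.length = ts.length →
      xs.foldl (fun st i => (ts.zip st).map (fun p => n50Step i p.1 p.2)) ss
        = (ts.zip ss).map (fun p => xs.foldl (fun s i => n50Step i p.1 s) p.2) := by
  induction xs with
  | nil => intro ss h; simp [zip_map_snd ts ss h]
  | cons x xs ih =>
    intro ss h
    have hlen : ((ts.zip ss).map (fun p => n50Step x p.1 p.2)).length = ts.length := by
      simp [List.length_zip, h]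
    rw [List.foldl_cons, ih _ hlen, zip_map_zip, List.map_map]
    simp [Function.comp]

-- ===== VERDICT (by name: the statement is the Claim_ definition above) =====
theorem n50_gt_spec : Claim_equal_n50_gt := by
  intro xs _
  show n50_gt xs = n50_gt_alt xs
  have hB : n50_gt_alt xs =
      [("n50>50kb", (n50Loop 50000 xs 0 0).1 + (n50Loop 50000 xs 0 0).2),
       ("n50>100kb", (n50Loop 100000 xs 0 0).1 + (n50Loop 100000 xs 0 0).2),
       ("n50>120kb", (n50Loop 120000 xs 0 0).1 + (n50Loop 120000 xs 0 0).2),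
       ("n50>150kb", (n50Loop 150000 xs 0 0).1 + (n50Loop 150000 xs 0 0).2),
       ("n50>200kb", (n50Loop 200000 xs 0 0).1 + (n50Loop 200000 xs 0 0).2)] := by
    simp only [n50_gt_alt]
    rw [foldl_zip_map [5, 10, 12, 15, 20] xs _ (by simp)]
    simp only [List.zip, List.map, List.zipWith]
    rw [n50Step_loop 5 xs 0 0, n50Step_loop 10 xs 0 0, n50Step_loop 12 xs 0 0,
        n50Step_loop 15 xs 0 0, n50Step_loop 20 xs 0 0]
    have k5 : "n50>" ++ PySem.Int.toStr 5 ++ "0kb" = "n50>50kb" := by decide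
    have k10 : "n50>" ++ PySem.Int.toStr 10 ++ "0kb" = "n50>100kb" := by decide
    have k12 : "n50>" ++ PySem.Int.toStr 12 ++ "0kb" = "n50>120kb" := by decide
    have k15 : "n50>" ++ PySem.Int.toStr 15 ++ "0kb" = "n50>150kb" := by decide
    have k20 : "n50>" ++ PySem.Int.toStr 20 ++ "0kb" = "n50>200kb" := by decide
    simp [k5, k10, k12, k15, k20]
  have hA : n50_gt xs =
      [("n50>50kb", (n50Loop 50000 xs 0 0).1 + (n50Loop 50000 xs 0 0).2),
       ("n50>100kb", (n50Loop 100000 xs 0 0).1 + (n50Loop 100000 xs 0 0).2),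
       ("n50>120kb", (n50Loop 120000 xs 0 0).1 + (n50Loop 120000 xs 0 0).2),
       ("n50>150kb", (n50Loop 150000 xs 0 0).1 + (n50Loop 150000 xs 0 0).2),
       ("n50>200kb", (n50Loop 200000 xs 0 0).1 + (n50Loop 200000 xs 0 0).2)] := by
    simp only [n50_gt]
    have hr : PySem.List.pyRange 0 (([5, 10, 12, 15, 20] : List Int).length : Int) 1
        = [0, 1, 2, 3, 4] := by decide
    rw [hr]
    have k5 : "n50>" ++ PySem.Int.toStr 5 ++ "0kb" = "n50>50kb" := by decide
    have k10 : "n50>" ++ PySem.Int.toStr 10 ++ "0kb" = "n50>100kb" := by decide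
    have k12 : "n50>" ++ PySem.Int.toStr 12 ++ "0kb" = "n50>120kb" := by decide
    have k15 : "n50>" ++ PySem.Int.toStr 15 ++ "0kb" = "n50>150kb" := by decide
    have k20 : "n50>" ++ PySem.Int.toStr 20 ++ "0kb" = "n50>200kb" := by decide
    simp only [List.foldl_cons, List.foldl_nil, PySem.List.pyGetD_ofNat',
      List.getD_cons_zero, List.getD_cons_succ]
    norm_num [k5, k10, k12, k15, k20]
    simp [PySem.Dict.items_insert, PySem.Dict.contains_insert,
      PySem.Dict.empty]
  rw [hA, hB]
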